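-- pv_equiv track=rewrite | github.com/Jazyki-Mira/langworld_db_data | langworld_db_data/tools/files/csv_xls.py | remove_multiple_matching_rows
-- ===== SOURCE A (Python) =====
-- from copy import deepcopy
--
-- def remove_multiple_matching_rows(
--     rows: list[dict[str, str]],
--     lookup_column: str,
--     match_content: str,
-- ) -> tuple[list[dict[str, str]], tuple[int]]:
--     """
--     Remove all rows from a list of dictionaries where the specified column matches
--     the given content. Returns the modified list of dictionaries and a tuple containing
--     the 0-based indices of the first and last removed rows.
--
--     Important!
--         Incoming list is deepcopied, which means that original
--         dictionaries in the list are not changed, and new ones are returned.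
--
--     Args:
--         rows: List of dictionaries representing rows
--         lookup_column: Name of the column to search in
--         match_content: Content to search for in the specified column
--
--     Returns:
--         tuple: (modified_rows, (first_removed_index, last_removed_index))
--
--     Raises:
--         TypeError: If match_content is not str or int
--         KeyError:
--             - If the specified lookup_column is not found in the rows
--             - If no rows match the specified match_content in the lookup_column
--
--     Note:
--         - Indices are 0-based
--         - For removing exactly one row, use remove_one_matching_row
--     """
--
--     if type(match_content) not in (int, str):
--         raise TypeError(
--             f"match_content must be of type <str> or <int>, <{type(match_content)}> was given."
--         )
--
--     if lookup_column not in rows[0]: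
--         # TODO add test
--         raise KeyError(f"{lookup_column=} not found. Cannot remove rows")
--
--     line_numbers_of_removed_rows = []
--
--     copied_rows = deepcopy(rows)
--
--     for i, row in enumerate(copied_rows):
--         if row[lookup_column] == match_content:
--             line_numbers_of_removed_rows.append(i)
--
--     if len(line_numbers_of_removed_rows) == 0:
--         raise KeyError(
--             f"{match_content=} not found in column {lookup_column=}. Couldn't remove rows"
--         )
--
--     first_line_number = line_numbers_of_removed_rows[0]
--     last_line_number = line_numbers_of_removed_rows[-1]
--
--     return (
--         copied_rows[:first_line_number] + copied_rows[last_line_number + 1 :],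
--         (first_line_number, last_line_number),
--     )
-- ===== SOURCE B (Python) =====
-- from copy import deepcopy
--
--
-- def remove_multiple_matching_rows(
--     rows: list[dict[str, str]],
--     lookup_column: str,
--     match_content: str,
-- ) -> tuple[list[dict[str, str]], tuple[int]]:
--     """Same contract as the original, but instead of collecting every matching
--     index in one full pass, finds the first matching index by a forward scan
--     (with early break) and the last one by a backward scan over the reversed
--     list (with early break)."""
--     if type(match_content) not in (int, str):
--         raise TypeError(
--             f"match_content must be of type <str> or <int>, <{type(match_content)}> was given."
--         )
--
--     if lookup_column not in rows[0]:
--         raise KeyError(f"{lookup_column=} not found. Cannot remove rows")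
--
--     copied_rows = deepcopy(rows)
--     n = len(copied_rows)
--
--     first_line_number = None
--     for i, row in enumerate(copied_rows):
--         if row[lookup_column] == match_content:
--             first_line_number = i
--             break
--
--     if first_line_number is None:
--         raise KeyError(
--             f"{match_content=} not found in column {lookup_column=}. Couldn't remove rows"
--         )
--
--     last_line_number = first_line_number
--     for j, row in enumerate(reversed(copied_rows)):
--         if row[lookup_column] == match_content:
--             last_line_number = n - 1 - j
--             break
--
--     return (
--         copied_rows[:first_line_number] + copied_rows[last_line_number + 1:],
--         (first_line_number, last_line_number),
--     )
-- ===== Notes on version B (the rewrite author's own statement) =====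
-- stated objective: alternative
-- what changed: Replaces the single full pass that appends every matching index to a list with two directional scans that break early: a forward scan for the first matching index and a backward scan over the reversed list for the last one; no index list is built.
import Mathlib
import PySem

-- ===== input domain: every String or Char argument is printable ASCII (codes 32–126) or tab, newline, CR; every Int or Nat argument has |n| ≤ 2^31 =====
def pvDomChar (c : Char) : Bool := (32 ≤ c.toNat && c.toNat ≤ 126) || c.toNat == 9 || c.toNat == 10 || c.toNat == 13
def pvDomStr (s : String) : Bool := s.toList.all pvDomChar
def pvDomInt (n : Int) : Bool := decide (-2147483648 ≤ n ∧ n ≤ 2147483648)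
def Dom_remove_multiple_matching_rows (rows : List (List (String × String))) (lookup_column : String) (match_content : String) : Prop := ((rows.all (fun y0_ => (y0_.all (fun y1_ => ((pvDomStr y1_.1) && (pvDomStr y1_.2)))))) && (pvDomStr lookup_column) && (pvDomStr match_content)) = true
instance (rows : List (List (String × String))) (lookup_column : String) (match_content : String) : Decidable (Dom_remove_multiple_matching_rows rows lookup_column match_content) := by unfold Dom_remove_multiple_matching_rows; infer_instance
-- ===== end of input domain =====

-- B replaces A's single full pass that collects every matching index with two early-exit
-- directional scans (forward for the first index, backward over the reversed list for the last);
-- equivalence is about the RETURN value (deepcopy of immutable string dicts is the identity here).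

-- ===== PORT A =====
-- Python A; match_content is a str by the signature, so the TypeError guard never fires.
-- Where Python raises (empty rows → IndexError; lookup_column missing / no match → KeyError)
-- the port returns the sentinel ([], (-1, -1)); those inputs are excluded by Pre_.
def remove_multiple_matching_rows (rows : List (List (String × String))) (lookup_column : String) (match_content : String) : (List (List (String × String))) × (Int × Int) :=
  match rows with
  | [] => ([], (-1, -1))  -- rows[0] raises IndexError
  | r0 :: _ =>
    if (PySem.Dict.mk r0).contains lookup_column = false then ([], (-1, -1))  -- KeyError
    else
      let copied := rows  -- deepcopy: identity on immutable values (return-value equivalence)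
      let nums : List Int := (PySem.List.enumerate copied 0).foldl
        (fun acc ir =>
          if (PySem.Dict.mk ir.2).get? lookup_column = some match_content then acc ++ [ir.1]
          else acc) []
      match nums.head?, PySem.List.pyGet? nums (-1) with
      | some f, some l =>
          (PySem.List.slice copied none (some f) ++ PySem.List.slice copied (some (l + 1)) none,
           (f, l))
      | _, _ => ([], (-1, -1))  -- len == 0: KeyError (no matching rows)

-- ===== PORT B =====
-- forward scan with early exit: index of the first row whose lookup_column equals match_content
def rmr_scan (lookup_column : String) (match_content : String) : List (List (String × String)) → Int → Option Int
  | [], _ => none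
  | r :: rest, i =>
    if (PySem.Dict.mk r).get? lookup_column = some match_content then some i
    else rmr_scan lookup_column match_content rest (i + 1)

def remove_multiple_matching_rows_alt (rows : List (List (String × String))) (lookup_column : String) (match_content : String) : (List (List (String × String))) × (Int × Int) :=
  match rows with
  | [] => ([], (-1, -1))  -- rows[0] raises IndexError
  | r0 :: _ =>
    if (PySem.Dict.mk r0).contains lookup_column = false then ([], (-1, -1))  -- KeyError
    else
      let copied := rows
      let n : Int := PySem.List.len copied
      match rmr_scan lookup_column match_content copied 0 with
      | none => ([], (-1, -1))  -- KeyError (no matching rows)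
      | some f =>
        let l : Int :=
          match rmr_scan lookup_column match_content copied.reverse 0 with
          | some j => n - 1 - j
          | none => f  -- unreachable: the forward scan found a match
        (PySem.List.slice copied none (some f) ++ PySem.List.slice copied (some (l + 1)) none,
         (f, l))

-- ===== PRECONDITION & SPEC =====
-- Pre_: exactly the inputs where Python A returns normally: rows nonempty (else IndexError),
-- every row has lookup_column (A reads row[lookup_column] on every row; else KeyError),
-- and at least one row matches (else KeyError).
def Pre_remove_multiple_matching_rows (rows : List (List (String × String))) (lookup_column : String) (match_content : String) : Prop :=
  rows ≠ [] ∧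
  (∀ r ∈ rows, (PySem.Dict.mk r).contains lookup_column = true) ∧
  (∃ r ∈ rows, (PySem.Dict.mk r).get? lookup_column = some match_content)

instance (rows : List (List (String × String))) (lookup_column : String) (match_content : String) : Decidable (Pre_remove_multiple_matching_rows rows lookup_column match_content) := by unfold Pre_remove_multiple_matching_rows; infer_instance

def pvWitness_remove_multiple_matching_rows : (List (List (String × String))) × String × String :=
  ([[("id", "a"), ("v", "1")], [("id", "b"), ("v", "2")], [("id", "a"), ("v", "3")], [("id", "c"), ("v", "4")]], "id", "a")

def Spec_remove_multiple_matching_rows (rows : List (List (String × String))) (lookup_column : String) (match_content : String) (out : (List (List (String × String))) × (Int × Int)) : Prop := out = remove_multiple_matching_rows_alt rows lookup_column match_content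
instance (rows : List (List (String × String))) (lookup_column : String) (match_content : String) (out : (List (List (String × String))) × (Int × Int)) : Decidable (Spec_remove_multiple_matching_rows rows lookup_column match_content out) := by unfold Spec_remove_multiple_matching_rows; infer_instance

-- ===== CLAIM (what is proved, stated in full; the proofs are below) =====
def Claim_equal_remove_multiple_matching_rows : Prop := ∀ (rows : List (List (String × String))) (lookup_column : String) (match_content : String), Dom_remove_multiple_matching_rows rows lookup_column match_content → Pre_remove_multiple_matching_rows rows lookup_column match_content → Spec_remove_multiple_matching_rows rows lookup_column match_content (remove_multiple_matching_rows rows lookup_column match_content)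

-- ===== LEMMAS AND PROOFS =====

-- a cons list keeps the last element of its (nonempty) tail
theorem rmr_getLast?_cons_ne {α : Type} (a : α) (l : List α) (h : l ≠ []) :
    (a :: l).getLast? = l.getLast? := by
  cases l with
  | nil => exact absurd rfl h
  | cons b t => simp [List.getLast?_cons_cons]

-- the forward scan computes the head of the list of matching indices
theorem rmr_scan_head (c m : String) (l : List (List (String × String))) (s : Int) :
    ((((PySem.List.enumerate l s).filter (fun ir => decide ((PySem.Dict.mk ir.2).get? c = some m))).map (·.1)).head?) =
      rmr_scan c m l s := by
  induction l generalizing s with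
  | nil => simp [PySem.List.enumerate, rmr_scan]
  | cons r rest ih =>
    rw [PySem.List.enumerate_cons, List.filter_cons]
    by_cases h : (PySem.Dict.mk r).get? c = some m
    · rw [if_pos (by simpa using h)]
      simp [rmr_scan, h]
    · rw [if_neg (by simpa using h), ih]
      simp [rmr_scan, h]

-- scanning an appended list: try the left part first, then the right part shifted by its length
theorem rmr_scan_append (c m : String) (a b : List (List (String × String))) (s : Int) :
    rmr_scan c m (a ++ b) s =
      (match rmr_scan c m a s with
       | some j => some j
       | none => rmr_scan c m b (s + a.length)) := by
  induction a generalizing s with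
  | nil => simp [rmr_scan]
  | cons r rest ih =>
    by_cases h : (PySem.Dict.mk r).get? c = some m
    · simp [rmr_scan, h]
    · simp only [List.cons_append, rmr_scan, h, if_false, ih]
      have : s + 1 + (rest.length : Int) = s + (r :: rest).length := by
        simp [List.length_cons]; ring
      rw [this]

-- the backward scan over the reversed list computes the last matching index
theorem rmr_scan_last (c m : String) (l : List (List (String × String))) (s : Int) :
    ((((PySem.List.enumerate l s).filter (fun ir => decide ((PySem.Dict.mk ir.2).get? c = some m))).map (·.1)).getLast?) =
      (rmr_scan c m l.reverse 0).map (fun j => s + l.length - 1 - j) := by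
  induction l generalizing s with
  | nil => simp [rmr_scan]
  | cons r rest ih =>
    rw [PySem.List.enumerate_cons, List.filter_cons]
    have hrev : (r :: rest).reverse = rest.reverse ++ [r] := by simp
    rw [hrev, rmr_scan_append]
    cases hsc : rmr_scan c m rest.reverse 0 with
    | some j =>
      have htail := ih (s + 1)
      rw [hsc] at htail
      simp only [Option.map_some] at htail
      have hne : (((PySem.List.enumerate rest (s + 1)).filter (fun ir => decide ((PySem.Dict.mk ir.2).get? c = some m))).map (·.1)) ≠ [] := by
        intro h0
        rw [h0] at htail
        simp at htail
      by_cases h : (PySem.Dict.mk r).get? c = some m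
      · rw [if_pos (by simpa using h), List.map_cons,
            rmr_getLast?_cons_ne _ _ hne, htail]
        simp only [Option.map_some, List.length_cons]
        congr 1
        push_cast
        ring
      · rw [if_neg (by simpa using h), htail]
        simp only [Option.map_some, List.length_cons]
        congr 1
        push_cast
        ring
    | none =>
      have htail := ih (s + 1)
      rw [hsc] at htail
      simp only [Option.map_none] at htail
      have hnil : (((PySem.List.enumerate rest (s + 1)).filter (fun ir => decide ((PySem.Dict.mk ir.2).get? c = some m))).map (·.1)) = [] :=
        List.getLast?_eq_none_iff.mp htail
      by_cases h : (PySem.Dict.mk r).get? c = some m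
      · rw [if_pos (by simpa using h), List.map_cons, hnil]
        simp only [List.getLast?_singleton, rmr_scan, h, if_pos, List.length_cons,
          List.length_reverse, Option.map_some]
        congr 1
        push_cast
        ring
      · rw [if_neg (by simpa using h), hnil]
        simp [rmr_scan, h]

-- under the precondition the list of matching indices is nonempty
theorem rmr_nums_ne_nil (c m : String) (l : List (List (String × String)))
    (hex : ∃ r ∈ l, (PySem.Dict.mk r).get? c = some m) (s : Int) :
    (((PySem.List.enumerate l s).filter (fun ir => decide ((PySem.Dict.mk ir.2).get? c = some m))).map (·.1)) ≠ [] := by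
  induction l generalizing s with
  | nil => simp at hex
  | cons r rest ih =>
    rw [PySem.List.enumerate_cons, List.filter_cons]
    by_cases h : (PySem.Dict.mk r).get? c = some m
    · rw [if_pos (by simpa using h)]
      simp
    · rw [if_neg (by simpa using h)]
      obtain ⟨r', hr', hm⟩ := hex
      rcases List.mem_cons.mp hr' with rfl | hr'
      · exact absurd hm h
      · exact ih ⟨r', hr', hm⟩ (s + 1)

-- ===== VERDICT (by name: the statement is the Claim_ definition above) =====
theorem remove_multiple_matching_rows_spec : Claim_equal_remove_multiple_matching_rows := by
  intro rows c m _ hpre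
  obtain ⟨hne, _hall, hex⟩ := hpre
  unfold Spec_remove_multiple_matching_rows
  cases rows with
  | nil => exact absurd rfl hne
  | cons r0 rest =>
    unfold remove_multiple_matching_rows remove_multiple_matching_rows_alt
    obtain ⟨rm, hrm, hget⟩ := hex
    have hc0 : (PySem.Dict.mk r0).contains c = true := _hall r0 (by simp)
    simp only [hc0, Bool.true_eq_false, if_false]
    -- A's index list is the filtered-and-mapped enumeration (PySem.List.foldl_append_if)
    have hnums : (PySem.List.enumerate (r0 :: rest) 0).foldl
        (fun (acc : List Int) ir =>
          if (PySem.Dict.mk ir.2).get? c = some m then acc ++ [ir.1] else acc) [] =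
        (((PySem.List.enumerate (r0 :: rest) 0).filter
            (fun ir => decide ((PySem.Dict.mk ir.2).get? c = some m))).map (·.1)) := by
      have h := PySem.List.foldl_append_if
        (fun (ir : Int × List (String × String)) => decide ((PySem.Dict.mk ir.2).get? c = some m))
        (fun (ir : Int × List (String × String)) => ir.1)
        (PySem.List.enumerate (r0 :: rest) 0) []
      simp only [decide_eq_true_eq] at h
      simpa using h
    rw [hnums]
    set nums := (((PySem.List.enumerate (r0 :: rest) 0).filter (fun ir => decide ((PySem.Dict.mk ir.2).get? c = some m))).map (·.1)) with hnumsdef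
    have hne' : nums ≠ [] := rmr_nums_ne_nil c m (r0 :: rest) ⟨rm, hrm, hget⟩ 0
    have hfwd : rmr_scan c m (r0 :: rest) 0 ≠ none := by
      rw [← rmr_scan_head]
      simp only [Ne, List.head?_eq_none_iff]
      exact hne'
    cases hsc : rmr_scan c m (r0 :: rest) 0 with
    | none => exact absurd hsc hfwd
    | some f =>
      have hhead : nums.head? = some f := by rw [hnumsdef, rmr_scan_head, hsc]
      have hbwd : rmr_scan c m (r0 :: rest).reverse 0 ≠ none := by
        intro hb
        have := rmr_scan_last c m (r0 :: rest) 0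
        rw [hb] at this
        simp only [Option.map_none] at this
        exact hne' (List.getLast?_eq_none_iff.mp this)
      cases hscb : rmr_scan c m (r0 :: rest).reverse 0 with
      | none => exact absurd hscb hbwd
      | some j =>
        have hlast : nums.getLast? = some ((r0 :: rest).length - 1 - j : Int) := by
          rw [hnumsdef, rmr_scan_last, hscb]
          simp only [Option.map_some]
          congr 1
          ring
        rw [PySem.List.pyGet?_neg_one, hhead, hlast]
        simp [PySem.List.len_eq]
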